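-- pv_equiv track=rewrite | github.com/MohiuddinSohel/Leetcoding | amazonOAPreparation/OA.py | overall_min_effort_storage_bin
-- ===== SOURCE A (Python) =====
-- from collections import defaultdict, Counter, deque
--
-- def overall_min_effort_storage_bin(arr):
--     # https://leetcode.com/company/amazon/discuss/6044882/Amazon-Online-Assessment-Question-2024-November
--     counter = Counter(arr)
--     arr_min = min(arr)
--     arr_max = max(arr)
--     count = 0
--     for num in range(arr_min, arr_max + 1):
--         if num not in counter:
--             continue
--         for divisor in range(num, arr_max + 1, num):
--             count += (num * counter[divisor])
--             del counter[divisor]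
--     return count
-- ===== SOURCE B (Python) =====
-- from collections import Counter
--
-- def overall_min_effort_storage_bin(arr):
--     counts = Counter(arr)
--     pos = sorted(v for v in counts if v > 0)
--     total = 0
--     for v in pos:
--         d = next(x for x in pos if v % x == 0)  # smallest positive value present that divides v
--         total += d * counts[v]
--     return total
-- ===== Notes on version B (the rewrite author's own statement) =====
-- stated objective: alternative
-- what changed: B iterates only over the distinct sorted positive values and, for each, scans that sorted list for its smallest present divisor, instead of A's sieve over every integer from min(arr) to max(arr) with multiple enumeration and counter deletion; B's cost depends on the number of distinct values (O(d^2)) rather than on the value range (O(max log max)), a trade-off, not a measured speed-up.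
import Mathlib
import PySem

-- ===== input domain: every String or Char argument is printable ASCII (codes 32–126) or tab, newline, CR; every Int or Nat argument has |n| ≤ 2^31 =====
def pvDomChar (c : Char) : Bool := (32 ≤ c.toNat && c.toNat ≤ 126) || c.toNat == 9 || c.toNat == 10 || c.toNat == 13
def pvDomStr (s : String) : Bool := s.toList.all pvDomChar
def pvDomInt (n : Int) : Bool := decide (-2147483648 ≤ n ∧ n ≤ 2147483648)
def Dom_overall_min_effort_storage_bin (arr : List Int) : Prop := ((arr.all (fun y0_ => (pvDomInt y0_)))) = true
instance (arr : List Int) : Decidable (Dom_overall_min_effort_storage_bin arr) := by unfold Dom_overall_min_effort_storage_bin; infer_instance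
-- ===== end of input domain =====

-- B iterates only the distinct sorted positive values, finding each value's smallest present
-- divisor in that short sorted list, instead of A's sieve over every integer in [min(arr), max(arr)].

-- ===== PORT A =====
def overall_min_effort_storage_bin (arr : List Int) : Int :=
  let counter := PySem.Dict.counter arr
  match PySem.List.min? arr (fun x => x), PySem.List.max? arr (fun x => x) with
  | some arr_min, some arr_max =>
    ((PySem.List.pyRange arr_min (arr_max + 1) 1).foldl
      (fun (st : PySem.Dict Int Int × Int) num =>
        if st.1.contains num then
          (PySem.List.pyRange num (arr_max + 1) num).foldl
            (fun st divisor => (st.1.erase divisor, st.2 + num * st.1.getD divisor 0)) st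
        else st)
      (counter, 0)).2
  | _, _ => 0  -- unreachable under Pre_ (arr ≠ []): Python raises ValueError on min([])

-- ===== PORT B =====
def overall_min_effort_storage_bin_alt (arr : List Int) : Int :=
  let counts := PySem.Dict.counter arr
  let pos := PySem.List.sorted ((counts.keys).filter (fun v => decide (0 < v))) (fun x => x) false
  pos.foldl (fun total v =>
    match pos.find? (fun x => PySem.Int.mod v x == 0) with
    | some d => total + d * counts.getD v 0
    | none => total) 0   -- never taken: v itself divides v

-- ===== PRECONDITION & SPEC =====
-- Pre_ excludes exactly the inputs on which A raises ValueError: the empty list (min of an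
-- empty sequence) and lists containing 0 (range() with step 0).
def Pre_overall_min_effort_storage_bin (arr : List Int) : Prop := arr ≠ [] ∧ (0 : Int) ∉ arr
instance (arr : List Int) : Decidable (Pre_overall_min_effort_storage_bin arr) := by
  unfold Pre_overall_min_effort_storage_bin; infer_instance

def pvWitness_overall_min_effort_storage_bin : List Int := [4, 6, 12]


def Spec_overall_min_effort_storage_bin (arr : List Int) (out : Int) : Prop := out = overall_min_effort_storage_bin_alt arr
instance (arr : List Int) (out : Int) : Decidable (Spec_overall_min_effort_storage_bin arr out) := by unfold Spec_overall_min_effort_storage_bin; infer_instance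

-- ===== CLAIM (what is proved, stated in full; the proofs are below) =====
def Claim_equal_overall_min_effort_storage_bin : Prop := ∀ (arr : List Int), Dom_overall_min_effort_storage_bin arr → Pre_overall_min_effort_storage_bin arr → Spec_overall_min_effort_storage_bin arr (overall_min_effort_storage_bin arr)

-- ===== LEMMAS AND PROOFS =====

-- k deleted from the counter once A's outer loop has processed all nums < N
abbrev pvDel (arr : List Int) (N k : Int) : Prop :=
  0 < k ∧ ∃ d ∈ arr, 0 < d ∧ d < N ∧ d ∣ k

-- smallest positive element of arr dividing v (0 if none)
def pvMinDiv (arr : List Int) (v : Int) : Int :=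
  ((arr.filter (fun d => decide (0 < d ∧ d ∣ v))).min?).getD 0

def pvSumTo (arr : List Int) (N : Int) : Int :=
  ((arr.filter (fun v => decide (pvDel arr N v))).map (pvMinDiv arr)).sum

def pvSpecSum (arr : List Int) : Int :=
  ((arr.filter (fun v => decide (0 < v))).map (pvMinDiv arr)).sum

-- ---- Dict.erase lookups (erase filters out every pair with the given key) ----

lemma pv_find_filter (l : List (Int × Int)) (k k' : Int) :
    (l.filter (fun p => !(p.1 == k))).find? (fun p => p.1 == k') =
      (if k' = k then none else l.find? (fun p => p.1 == k')) := by
  by_cases hkk : k' = k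
  · subst hkk
    rw [if_pos rfl, List.find?_eq_none]
    intro x hx
    simp only [List.mem_filter] at hx
    simpa using hx.2
  · rw [if_neg hkk]
    induction l with
    | nil => simp
    | cons p t ih =>
      rw [List.filter_cons]
      by_cases h1 : p.1 = k
      · rw [if_neg (by simp [h1]), ih,
            List.find?_cons_of_neg (by simp [h1]; exact fun hh => hkk hh.symm)]
      · rw [if_pos (by simp [h1])]
        by_cases h2 : p.1 = k'
        · rw [List.find?_cons_of_pos (by simp [h2]), List.find?_cons_of_pos (by simp [h2])]
        · rw [List.find?_cons_of_neg (by simp [h2]), ih,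
              List.find?_cons_of_neg (by simp [h2])]

lemma pv_get?_erase (d : PySem.Dict Int Int) (k k' : Int) :
    (d.erase k).get? k' = if k' = k then none else d.get? k' := by
  cases d with
  | mk items =>
    simp only [PySem.Dict.erase, PySem.Dict.get?]
    rw [pv_find_filter]
    split <;> rfl

lemma pv_getD_erase (d : PySem.Dict Int Int) (k k' : Int) :
    (d.erase k).getD k' 0 = if k' = k then 0 else d.getD k' 0 := by
  rw [PySem.Dict.getD_eq_get?_getD, pv_get?_erase, PySem.Dict.getD_eq_get?_getD]
  split <;> rfl

lemma pv_contains_erase (d : PySem.Dict Int Int) (k k' : Int) :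
    (d.erase k).contains k' = (!decide (k' = k) && d.contains k') := by
  rw [PySem.Dict.contains_eq_isSome_get?, PySem.Dict.contains_eq_isSome_get?, pv_get?_erase]
  by_cases h : k' = k <;> simp [h]

-- ---- sum bookkeeping ----

lemma pv_sum_ite_mem (f : Int → Int) (a : Int) (L : List Int) (h : L.Nodup) :
    ((L.map (fun v => if a = v then f v else 0)).sum) = if a ∈ L then f a else 0 := by
  induction L with
  | nil => simp
  | cons x t ih =>
    simp only [List.nodup_cons] at h
    simp only [List.map_cons, List.sum_cons, ih h.2]
    by_cases hax : a = x
    · subst hax; simp [h.1]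
    · simp [hax, List.mem_cons]

lemma pv_keysum (f : Int → Int) (L arr : List Int) (h : L.Nodup) :
    (L.map (fun v => f v * (arr.count v : Int))).sum
      = ((arr.filter (fun x => decide (x ∈ L))).map f).sum := by
  induction arr with
  | nil => simp
  | cons a t ih =>
    have hsplit : (L.map (fun v => f v * ((a :: t).count v : Int))).sum
        = (L.map (fun v => f v * (t.count v : Int))).sum
          + (L.map (fun v => if a = v then f v else 0)).sum := by
      rw [← List.sum_map_add]
      apply congrArg
      apply List.map_congr_left
      intro v hv
      by_cases hav : a = v
      · subst hav; simp; ring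
      · simp [hav]
    rw [hsplit, ih, pv_sum_ite_mem f a L h]
    by_cases hm : a ∈ L
    · simp [hm, List.sum_cons]; ring
    · simp [hm]

lemma pv_sum_filter_ite (p : Int → Bool) (q : Int → Prop) [DecidablePred q] (f : Int → Int) (arr : List Int) :
    ((arr.filter p).map (fun x => if q x then f x else 0)).sum
      = ((arr.filter (fun x => p x && decide (q x))).map f).sum := by
  induction arr with
  | nil => simp
  | cons a t ih =>
    by_cases hp : p a <;> by_cases hq : q a <;>
      simp [hp, hq, ih]

lemma pv_filter_sum_split (p q : Int → Bool) (f : Int → Int) (arr : List Int)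
    (h : ∀ x ∈ arr, p x = true → q x = true) :
    ((arr.filter q).map f).sum
      = ((arr.filter p).map f).sum + ((arr.filter (fun x => q x && !p x)).map f).sum := by
  induction arr with
  | nil => simp
  | cons a t ih =>
    have ht : ∀ x ∈ t, p x = true → q x = true := fun x hx => h x (List.mem_cons_of_mem a hx)
    by_cases hp : p a
    · have hq : q a := h a List.mem_cons_self hp
      simp [hp, hq, ih ht]; ring
    · by_cases hq : q a <;> simp [hp, hq, ih ht] <;> ring

-- ---- characterisation of pvMinDiv ----

lemma pv_minDiv_eq (arr : List Int) (m N : Int) (hN : N ∈ arr) (hN0 : 0 < N) (hNd : N ∣ m)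
    (hleast : ∀ d ∈ arr, 0 < d → d ∣ m → N ≤ d) :
    pvMinDiv arr m = N := by
  unfold pvMinDiv
  have hmem : N ∈ arr.filter (fun d => decide (0 < d ∧ d ∣ m)) :=
    List.mem_filter.mpr ⟨hN, by simp [hN0, hNd]⟩
  rcases hmin : (arr.filter (fun d => decide (0 < d ∧ d ∣ m))).min? with _ | μ
  · rw [List.min?_eq_none_iff] at hmin
    rw [hmin] at hmem
    simp at hmem
  · rw [List.min?_eq_some_iff] at hmin
    obtain ⟨hμmem, hμle⟩ := hmin
    have h2 : μ ≤ N := hμle N hmem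
    simp only [List.mem_filter, decide_eq_true_eq] at hμmem
    have h1 : N ≤ μ := hleast μ hμmem.1 hμmem.2.1 hμmem.2.2
    simp; omega

-- ---- least element found by find? in a ≤-sorted list ----

lemma pv_find_least (L : List Int) (p : Int → Bool) (hs : L.Pairwise (fun a b => a ≤ b)) :
    ∀ m, L.find? p = some m → ∀ x ∈ L, p x = true → m ≤ x := by
  induction L with
  | nil => simp
  | cons a t ih =>
    intro m hm x hx hpx
    rw [List.pairwise_cons] at hs
    by_cases hpa : p a
    · rw [List.find?_cons_of_pos hpa, Option.some_inj] at hm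
      subst hm
      rcases List.mem_cons.mp hx with rfl | hx
      · exact le_rfl
      · exact hs.1 x hx
    · rw [List.find?_cons_of_neg hpa] at hm
      rcases List.mem_cons.mp hx with rfl | hx
      · exact absurd hpx hpa
      · exact ih hs.2 m hm x hx hpx

-- ---- the inner (divisor) loop of A ----

lemma pv_inner (num : Int) (M : List Int) (hM : M.Nodup) :
    ∀ st : PySem.Dict Int Int × Int,
      (M.foldl (fun st divisor => (st.1.erase divisor, st.2 + num * st.1.getD divisor 0)) st).2
          = st.2 + num * (M.map (fun m => st.1.getD m 0)).sum
      ∧ (∀ k, (M.foldl (fun st divisor => (st.1.erase divisor, st.2 + num * st.1.getD divisor 0)) st).1.getD k 0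
          = if k ∈ M then 0 else st.1.getD k 0)
      ∧ (∀ k, (M.foldl (fun st divisor => (st.1.erase divisor, st.2 + num * st.1.getD divisor 0)) st).1.contains k
          = (!decide (k ∈ M) && st.1.contains k)) := by
  induction M with
  | nil => intro st; simp
  | cons m t ih =>
    intro st
    simp only [List.nodup_cons] at hM
    obtain ⟨hs, hc, hcont⟩ := ih hM.2 (st.1.erase m, st.2 + num * st.1.getD m 0)
    refine ⟨?_, ?_, ?_⟩
    · rw [List.foldl_cons, hs]
      have hmap : (t.map (fun x => (st.1.erase m).getD x 0)).sum
          = (t.map (fun x => st.1.getD x 0)).sum := by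
        apply congrArg
        apply List.map_congr_left
        intro x hx
        rw [pv_getD_erase]
        have hxm : ¬ (x = m) := fun hh => hM.1 (hh ▸ hx)
        simp [hxm]
      simp only [hmap, List.map_cons, List.sum_cons]
      ring
    · intro k
      rw [List.foldl_cons, hc k, pv_getD_erase]
      by_cases hkm : k = m <;> by_cases hkt : k ∈ t <;> simp [hkm, hkt]
    · intro k
      rw [List.foldl_cons, hcont k, pv_contains_erase]
      by_cases hkm : k = m <;> by_cases hkt : k ∈ t <;> simp [hkm, hkt]

-- ---- evolution of pvDel with N ----

lemma pv_del_succ (arr : List Int) (N k : Int) :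
    pvDel arr (N + 1) k ↔ pvDel arr N k ∨ (0 < k ∧ 0 < N ∧ N ∈ arr ∧ N ∣ k) := by
  constructor
  · rintro ⟨hk, d, hd, hd0, hdN, hdk⟩
    by_cases h : d < N
    · exact Or.inl ⟨hk, d, hd, hd0, h, hdk⟩
    · have hdn : d = N := by omega
      subst hdn
      exact Or.inr ⟨hk, hd0, hd, hdk⟩
  · rintro (⟨hk, d, hd, hd0, hdN, hdk⟩ | ⟨hk, hN0, hN, hNk⟩)
    · exact ⟨hk, d, hd, hd0, by omega, hdk⟩
    · exact ⟨hk, N, hN, hN0, by omega, hNk⟩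

lemma pv_del_succ_skip (arr : List Int) (N : Int)
    (h : ¬ (N ∈ arr ∧ ¬ pvDel arr N N) ∨ N ≤ 0) (k : Int) :
    pvDel arr (N + 1) k ↔ pvDel arr N k := by
  rw [pv_del_succ]
  constructor
  · rintro (hd | ⟨hk, hN0, hN, hNk⟩)
    · exact hd
    · rcases h with h | h
      · have hdel : pvDel arr N N := by
          by_contra hnd
          exact h ⟨hN, hnd⟩
        obtain ⟨_, d, hd, hd0, hdN, hdN2⟩ := hdel
        exact ⟨hk, d, hd, hd0, hdN, hdN2.trans hNk⟩
      · omega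
  · exact Or.inl

lemma pv_sumTo_congr (arr : List Int) (N N' : Int)
    (h : ∀ k, pvDel arr N k ↔ pvDel arr N' k) :
    pvSumTo arr N = pvSumTo arr N' := by
  unfold pvSumTo
  have hf : arr.filter (fun v => decide (pvDel arr N v))
      = arr.filter (fun v => decide (pvDel arr N' v)) := by
    apply List.filter_congr
    intro x _
    simp [h x]
  rw [hf]

-- ---- the invariant of A's outer loop ----

def pvInv (arr : List Int) (N : Int) (st : PySem.Dict Int Int × Int) : Prop :=
  (∀ k, st.1.getD k 0 = if k ∈ arr ∧ ¬ pvDel arr N k then (arr.count k : Int) else 0)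
  ∧ (∀ k, st.1.contains k = decide (k ∈ arr ∧ ¬ pvDel arr N k))
  ∧ st.2 = pvSumTo arr N

lemma pv_inv_skip (arr : List Int) (N : Int) (st : PySem.Dict Int Int × Int)
    (hst : pvInv arr N st)
    (h : ¬ (N ∈ arr ∧ ¬ pvDel arr N N) ∨ N ≤ 0) :
    pvInv arr (N + 1) st := by
  obtain ⟨hg, hc, hs⟩ := hst
  have hi := pv_del_succ_skip arr N h
  refine ⟨?_, ?_, ?_⟩
  · intro k; simp only [hi k]; exact hg k
  · intro k; simp only [hi k]; exact hc k
  · rw [hs]; exact (pv_sumTo_congr arr (N + 1) N hi).symm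

lemma pv_step (arr : List Int) (mx N : Int) (h0 : (0 : Int) ∉ arr)
    (hmx : ∀ x ∈ arr, x ≤ mx) (st : PySem.Dict Int Int × Int) (hst : pvInv arr N st) :
    pvInv arr (N + 1)
      (if st.1.contains N then
        (PySem.List.pyRange N (mx + 1) N).foldl
          (fun st divisor => (st.1.erase divisor, st.2 + N * st.1.getD divisor 0)) st
      else st) := by
  obtain ⟨hg, hc, hs⟩ := hst
  by_cases hcon : st.1.contains N = true
  case neg =>
    rw [if_neg hcon]
    apply pv_inv_skip arr N st ⟨hg, hc, hs⟩
    left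
    intro hNin
    apply hcon
    rw [hc N]
    simp [hNin.1, hNin.2]
  case pos =>
    rw [if_pos hcon]
    rw [hc N] at hcon
    have hNmem : N ∈ arr ∧ ¬ pvDel arr N N := of_decide_eq_true hcon
    have hNne : N ≠ 0 := fun hh => h0 (hh ▸ hNmem.1)
    by_cases hNpos : 0 < N
    case neg =>
      have hempty : PySem.List.pyRange N (mx + 1) N = [] := by
        apply List.eq_nil_iff_forall_not_mem.mpr
        intro x hx
        rw [PySem.List.mem_pyRange_iff_of_neg (by omega)] at hx
        have hNx := hmx N hNmem.1
        omega
      rw [hempty, List.foldl_nil]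
      exact pv_inv_skip arr N st ⟨hg, hc, hs⟩ (Or.inr (by omega))
    case pos =>
      have hMnodup : (PySem.List.pyRange N (mx + 1) N).Nodup := by
        rw [PySem.List.pyRange_of_pos _ _ hNpos]
        apply List.Nodup.map _ List.nodup_range
        intro a b hab
        have hab2 : (a : Int) = b := by
          have := hab
          nlinarith [this]
        exact_mod_cast hab2
      have hMmem : ∀ m, m ∈ PySem.List.pyRange N (mx + 1) N ↔ N ≤ m ∧ m < mx + 1 ∧ N ∣ m := by
        intro m
        rw [PySem.List.mem_pyRange_iff_of_pos hNpos]
        constructor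
        · rintro ⟨h1, h2, h3⟩
          refine ⟨h1, h2, ?_⟩
          have := dvd_add h3 (dvd_refl N)
          simpa using this
        · rintro ⟨h1, h2, h3⟩
          exact ⟨h1, h2, dvd_sub h3 (dvd_refl N)⟩
      obtain ⟨hs2, hg2, hc2⟩ := pv_inner N (PySem.List.pyRange N (mx + 1) N) hMnodup st
      -- membership in M ↔ newly deleted, for elements of arr
      have hMdel : ∀ k, k ∈ arr →
          (k ∈ PySem.List.pyRange N (mx + 1) N ↔ (0 < k ∧ N ∣ k)) := by
        intro k hk
        rw [hMmem k]
        constructor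
        · rintro ⟨h1, _, h3⟩; exact ⟨by omega, h3⟩
        · rintro ⟨h1, h2⟩
          exact ⟨Int.le_of_dvd h1 h2, by have := hmx k hk; omega, h2⟩
      have hstable : ∀ k, k ∉ PySem.List.pyRange N (mx + 1) N →
          ((k ∈ arr ∧ ¬ pvDel arr (N + 1) k) ↔ (k ∈ arr ∧ ¬ pvDel arr N k)) := by
        intro k hkM
        constructor
        · rintro ⟨hka, hnd⟩
          exact ⟨hka, fun hd => hnd ((pv_del_succ arr N k).mpr (Or.inl hd))⟩
        · rintro ⟨hka, hnd⟩
          refine ⟨hka, fun hd => ?_⟩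
          rcases (pv_del_succ arr N k).mp hd with hd | ⟨hk0, _, _, hNk⟩
          · exact hnd hd
          · exact hkM ((hMdel k hka).mpr ⟨hk0, hNk⟩)
      have hnew : ∀ k, k ∈ PySem.List.pyRange N (mx + 1) N → k ∈ arr →
          pvDel arr (N + 1) k := by
        intro k hkM hka
        rw [pv_del_succ]
        right
        obtain ⟨hk0, hNk⟩ := (hMdel k hka).mp hkM
        exact ⟨hk0, hNpos, hNmem.1, hNk⟩
      refine ⟨?_, ?_, ?_⟩
      · intro k
        rw [hg2 k]
        by_cases hkM : k ∈ PySem.List.pyRange N (mx + 1) N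
        · rw [if_pos hkM]
          by_cases hka : k ∈ arr
          · rw [if_neg (fun hcond => hcond.2 (hnew k hkM hka))]
          · rw [if_neg (fun hcond => hka hcond.1)]
        · rw [if_neg hkM, hg k]
          simp only [hstable k hkM]
      · intro k
        rw [hc2 k, hc k]
        by_cases hkM : k ∈ PySem.List.pyRange N (mx + 1) N
        · simp only [hkM, decide_true, Bool.not_true, Bool.false_and]
          by_cases hka : k ∈ arr
          · exact (decide_eq_false (fun hcond => hcond.2 (hnew k hkM hka))).symm
          · exact (decide_eq_false (fun hcond => hka hcond.1)).symm
        · simp only [hkM, decide_false, Bool.not_false, Bool.true_and, hstable k hkM]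
      · rw [hs2, hs]
        -- pull N inside and rewrite the surviving counter values
        have hpull : N * ((PySem.List.pyRange N (mx + 1) N).map (fun m => st.1.getD m 0)).sum
            = ((PySem.List.pyRange N (mx + 1) N).map
                (fun v => (fun w => if w ∈ arr ∧ ¬ pvDel arr N w then N else 0) v
                  * (arr.count v : Int))).sum := by
          rw [← List.sum_map_mul_left]
          apply congrArg
          apply List.map_congr_left
          intro m _
          rw [hg m]
          by_cases hP : m ∈ arr ∧ ¬ pvDel arr N m <;> simp [hP]
        rw [hpull, pv_keysum _ _ _ hMnodup,
          pv_sum_filter_ite (fun x => decide (x ∈ PySem.List.pyRange N (mx + 1) N))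
            (fun w => w ∈ arr ∧ ¬ pvDel arr N w) (fun _ => N) arr]
        -- turn the filter into "deleted at N+1 but not at N"
        have hfe : arr.filter (fun x => decide (x ∈ PySem.List.pyRange N (mx + 1) N)
              && decide (x ∈ arr ∧ ¬ pvDel arr N x))
            = arr.filter (fun x => decide (pvDel arr (N + 1) x) && !decide (pvDel arr N x)) := by
          apply List.filter_congr
          intro x hx
          simp only [← decide_not, ← Bool.decide_and, decide_eq_decide]
          constructor
          · rintro ⟨hxM, _, hnd⟩
            exact ⟨hnew x hxM hx, hnd⟩
          · rintro ⟨hd1, hnd⟩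
            rcases (pv_del_succ arr N x).mp hd1 with hd | ⟨hk0, _, _, hNk⟩
            · exact absurd hd hnd
            · exact ⟨(hMdel x hx).mpr ⟨hk0, hNk⟩, hx, hnd⟩
        rw [hfe]
        have hconstmap : ((arr.filter (fun x => decide (pvDel arr (N + 1) x)
              && !decide (pvDel arr N x))).map (fun _ => N)).sum
            = ((arr.filter (fun x => decide (pvDel arr (N + 1) x)
              && !decide (pvDel arr N x))).map (pvMinDiv arr)).sum := by
          apply congrArg
          apply List.map_congr_left
          intro x hx
          simp only [List.mem_filter, Bool.and_eq_true, decide_eq_true_eq,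
            Bool.not_eq_eq_eq_not, Bool.not_true, decide_eq_false_iff_not] at hx
          obtain ⟨hxa, hd1, hnd⟩ := hx
          rcases (pv_del_succ arr N x).mp hd1 with hd | ⟨hk0, _, _, hNk⟩
          · exact absurd hd hnd
          · refine (pv_minDiv_eq arr x N hNmem.1 hNpos hNk ?_).symm
            intro d hd hd0 hdm
            by_contra hlt
            exact hnd ⟨hk0, d, hd, hd0, by omega, hdm⟩
        rw [hconstmap]
        unfold pvSumTo
        rw [pv_filter_sum_split (fun v => decide (pvDel arr N v))
              (fun v => decide (pvDel arr (N + 1) v)) (pvMinDiv arr) arr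
              (fun x _ hx => by
                simp only [decide_eq_true_eq] at hx ⊢
                exact (pv_del_succ arr N x).mpr (Or.inl hx))]

lemma pv_outer (arr : List Int) (mx : Int) (h0 : (0 : Int) ∉ arr)
    (hmx : ∀ x ∈ arr, x ≤ mx) (mn : Int) (hmn : ∀ x ∈ arr, mn ≤ x) :
    ∀ n : Nat,
      pvInv arr (mn + (n : Int))
        ((PySem.List.pyRange mn (mn + (n : Int)) 1).foldl
          (fun (st : PySem.Dict Int Int × Int) num =>
            if st.1.contains num then
              (PySem.List.pyRange num (mx + 1) num).foldl
                (fun st divisor => (st.1.erase divisor, st.2 + num * st.1.getD divisor 0)) st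
            else st)
          (PySem.Dict.counter arr, 0)) := by
  intro n
  induction n with
  | zero =>
    simp only [Nat.cast_zero, add_zero]
    rw [PySem.List.pyRange_one_eq_nil (le_refl mn), List.foldl_nil]
    have hnd : ∀ k, ¬ pvDel arr mn k := by
      rintro k ⟨_, d, hd, _, hdlt, _⟩
      exact absurd (hmn d hd) (by omega)
    refine ⟨?_, ?_, ?_⟩
    · intro k
      rw [PySem.Dict.getD_counter]
      by_cases hk : k ∈ arr
      · simp [hk, hnd k]
      · simp [hk, List.count_eq_zero_of_not_mem hk]
    · intro k
      rw [PySem.Dict.contains_counter]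
      by_cases hk : k ∈ arr <;> simp [hk, hnd k]
    · unfold pvSumTo
      rw [List.filter_eq_nil_iff.mpr (fun x _ => by simp [hnd x])]
      simp
  | succ n ih =>
    have hcast : mn + ((n + 1 : Nat) : Int) = (mn + (n : Int)) + 1 := by push_cast; ring
    rw [hcast, PySem.List.pyRange_one_succ_right (by omega), List.foldl_append,
      List.foldl_cons, List.foldl_nil]
    exact pv_step arr mx (mn + (n : Int)) h0 hmx _ ih

-- ---- A's value ----

lemma pv_A_eq (arr : List Int) (h : Pre_overall_min_effort_storage_bin arr) :
    overall_min_effort_storage_bin arr = pvSpecSum arr := by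
  obtain ⟨hne, h0⟩ := h
  unfold overall_min_effort_storage_bin
  rcases hmin : PySem.List.min? arr (fun x => x) with _ | mn
  · rw [PySem.List.min?_eq_none_iff] at hmin
    exact absurd hmin hne
  rcases hmax : PySem.List.max? arr (fun x => x) with _ | mx
  · rw [PySem.List.max?_eq_none_iff] at hmax
    exact absurd hmax hne
  dsimp only
  have hmn : ∀ x ∈ arr, mn ≤ x := fun x hx => PySem.List.min?_isMin hmin x hx
  have hmx : ∀ x ∈ arr, x ≤ mx := fun x hx => PySem.List.max?_isMax hmax x hx
  have hmnmem : mn ∈ arr := PySem.List.min?_mem hmin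
  have hmle : mn ≤ mx := hmx mn hmnmem
  have hn : mn + (((mx + 1 - mn).toNat : Nat) : Int) = mx + 1 := by omega
  have hinv := pv_outer arr mx h0 hmx mn hmn (mx + 1 - mn).toNat
  rw [hn] at hinv
  rw [hinv.2.2]
  unfold pvSumTo pvSpecSum
  have hfe : arr.filter (fun v => decide (pvDel arr (mx + 1) v))
      = arr.filter (fun v => decide (0 < v)) := by
    apply List.filter_congr
    intro x hx
    simp only [decide_eq_decide]
    constructor
    · rintro ⟨hx0, _⟩; exact hx0
    · intro hx0
      exact ⟨hx0, x, hx, hx0, by have := hmx x hx; omega, dvd_refl x⟩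
  rw [hfe]

-- ---- B's value ----

lemma pv_B_eq (arr : List Int) :
    overall_min_effort_storage_bin_alt arr = pvSpecSum arr := by
  unfold overall_min_effort_storage_bin_alt
  have hperm := PySem.List.sorted_perm
    (((PySem.Dict.counter arr).keys).filter (fun v => decide (0 < v))) (fun x => x) false
  have hkeys : (PySem.Dict.counter arr).keys = PySem.Set.ofList arr :=
    PySem.Dict.keys_counter arr
  set pos := PySem.List.sorted
    (((PySem.Dict.counter arr).keys).filter (fun v => decide (0 < v))) (fun x => x) false with hposdef
  have hposmem : ∀ x, x ∈ pos ↔ (x ∈ arr ∧ 0 < x) := by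
    intro x
    rw [hperm.mem_iff, List.mem_filter, hkeys]
    simp [PySem.Set.mem_ofList]
  have hnd : pos.Nodup := by
    rw [hperm.nodup_iff]
    apply List.Nodup.filter
    rw [hkeys]
    exact PySem.Set.nodup_ofList arr
  have hsorted : pos.Pairwise (fun a b => a ≤ b) :=
    PySem.List.sorted_pairwise _ (fun x => x)
  have hbody : ∀ v ∈ pos, pos.find? (fun x => PySem.Int.mod v x == 0) = some (pvMinDiv arr v) := by
    intro v hv
    rcases hfind : pos.find? (fun x => PySem.Int.mod v x == 0) with _ | d
    · exfalso
      have hall := List.find?_eq_none.mp hfind v hv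
      apply hall
      have hv0 : 0 < v := ((hposmem v).mp hv).2
      simp [PySem.Int.mod_eq_zero_iff_dvd]
    · have hdmem : d ∈ pos := List.mem_of_find?_eq_some hfind
      have hdp := List.find?_some hfind
      have hdvd : d ∣ v := by
        rw [← PySem.Int.mod_eq_zero_iff_dvd]
        simpa using hdp
      have hleast := pv_find_least pos _ hsorted d hfind
      have hmd : pvMinDiv arr v = d :=
        pv_minDiv_eq arr v d ((hposmem d).mp hdmem).1 ((hposmem d).mp hdmem).2 hdvd
          (fun e he he0 hev => hleast e ((hposmem e).mpr ⟨he, he0⟩)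
            (by simp [PySem.Int.mod_eq_zero_iff_dvd, hev]))
      rw [hmd]
  have hfold : pos.foldl (fun total v =>
        match pos.find? (fun x => PySem.Int.mod v x == 0) with
        | some d => total + d * (PySem.Dict.counter arr).getD v 0
        | none => total) 0
      = pos.foldl (fun total v => total + pvMinDiv arr v * (arr.count v : Int)) 0 := by
    apply PySem.List.foldl_congr_mem
    intro acc v hv
    rw [hbody v hv]
    simp [PySem.Dict.getD_counter]
  rw [hfold, PySem.List.foldl_add]
  rw [pv_keysum (pvMinDiv arr) pos arr hnd]
  have hfe : arr.filter (fun x => decide (x ∈ pos)) = arr.filter (fun v => decide (0 < v)) := by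
    apply List.filter_congr
    intro x hx
    simp [hposmem x, hx]
  rw [hfe]
  unfold pvSpecSum
  ring

-- ===== VERDICT (by name: the statement is the Claim_ definition above) =====
theorem overall_min_effort_storage_bin_spec : Claim_equal_overall_min_effort_storage_bin := by
  intro arr _ hpre
  unfold Spec_overall_min_effort_storage_bin
  rw [pv_A_eq arr hpre, pv_B_eq arr]
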